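-- pv_equiv track=rewrite | github.com/maninbule/teachPythonLeetcode | 05-模式面试coding/q8--交换数字.py | solve
-- ===== SOURCE A (Python) =====
-- def solve(A:list[int],B:list[int])->int:
--     from collections import defaultdict
--     cnt = defaultdict(int)
--     cntA = defaultdict(int)
--     n = len(A)
--     for i in range(n):
--         cnt[A[i]] += 1
--         cntA[A[i]] += 1
--         if A[i] != B[i]:
--             cnt[B[i]] += 1
--     ans = -1
--     for item,times in cnt.items():
--         if times == n:
--             if ans == -1:
--                 ans = n - cntA[item]
--             else:
--                 ans = min(ans,n - cntA[item])
--     return ans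
-- ===== SOURCE B (Python) =====
-- def solve(A: list[int], B: list[int]) -> int:
--     # Only a value present in column 0 can fill every column: test just A[0] and B[0].
--     if not A:
--         return -1
--     costs = [sum(a != v for a in A)
--              for v in {A[0], B[0]}
--              if all(a == v or b == v for a, b in zip(A, B))]
--     return min(costs) if costs else -1
-- ===== Notes on version B (the rewrite author's own statement) =====
-- stated objective: simpler
-- what changed: Instead of building two count dictionaries over all values and scanning the dictionary for an entry covering all n columns, B tests only the two possible candidates A[0] and B[0] (any value covering every column must occur in column 0), checking feasibility and counting mismatches directly.
import Mathlib
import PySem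

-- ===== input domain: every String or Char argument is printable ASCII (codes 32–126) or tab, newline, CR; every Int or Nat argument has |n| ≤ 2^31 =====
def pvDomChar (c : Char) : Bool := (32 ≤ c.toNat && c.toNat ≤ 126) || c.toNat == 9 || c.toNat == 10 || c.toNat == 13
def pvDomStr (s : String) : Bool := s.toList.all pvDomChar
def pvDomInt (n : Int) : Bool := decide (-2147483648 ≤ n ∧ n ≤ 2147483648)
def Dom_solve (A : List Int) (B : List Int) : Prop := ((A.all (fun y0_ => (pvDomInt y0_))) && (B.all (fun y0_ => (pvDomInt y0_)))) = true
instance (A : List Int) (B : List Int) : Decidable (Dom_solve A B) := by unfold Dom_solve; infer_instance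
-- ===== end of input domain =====

-- B replaces A's two count-dictionaries and dictionary scan by testing just the two column-0 candidate values; objective: simpler.


-- ===== PORT A =====
def solve (A : List Int) (B : List Int) : Int :=
  let n : Int := (A.length : Int)
  let st :=
    (PySem.List.pyRange 0 n).foldl
      (fun (s : PySem.Dict Int Int × PySem.Dict Int Int) i =>
        (if PySem.List.pyGetD A i 0 ≠ PySem.List.pyGetD B i 0 then
            (s.1.modify (PySem.List.pyGetD A i 0) 0 (· + 1)).modify (PySem.List.pyGetD B i 0) 0 (· + 1)
          else s.1.modify (PySem.List.pyGetD A i 0) 0 (· + 1),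
         s.2.modify (PySem.List.pyGetD A i 0) 0 (· + 1)))
      (PySem.Dict.empty, PySem.Dict.empty)
  st.1.items.foldl
    (fun ans kv =>
      if kv.2 = n then
        if ans = -1 then n - st.2.getD kv.1 0
        else min ans (n - st.2.getD kv.1 0)
      else ans)
    (-1)

-- ===== PORT B =====
def solve_alt (A : List Int) (B : List Int) : Int :=
  if A.length = 0 then -1
  else
    let costs :=
      ((PySem.Set.ofList [PySem.List.pyGetD A 0 0, PySem.List.pyGetD B 0 0] : List Int).filter
          (fun v => (A.zip B).all (fun p => p.1 == v || p.2 == v))).map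
        (fun v => (A.map (fun a => if a ≠ v then (1 : Int) else 0)).sum)
    match PySem.List.min? costs (fun x => x) with
    | some m => m
    | none => -1

-- ===== PRECONDITION & SPEC =====
-- A reads B[i] for every index i of A, so it raises IndexError exactly when B is shorter than A.
def Pre_solve (A : List Int) (B : List Int) : Prop := A.length ≤ B.length
instance (A : List Int) (B : List Int) : Decidable (Pre_solve A B) := by unfold Pre_solve; infer_instance
def pvWitness_solve : List Int × List Int := ([1, 2, 2], [2, 1, 2])

def Spec_solve (A : List Int) (B : List Int) (out : Int) : Prop := out = solve_alt A B
instance (A : List Int) (B : List Int) (out : Int) : Decidable (Spec_solve A B out) := by unfold Spec_solve; infer_instance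

-- ===== CLAIM (what is proved, stated in full; the proofs are below) =====
def Claim_equal_solve : Prop := ∀ (A : List Int) (B : List Int), Dom_solve A B → Pre_solve A B → Spec_solve A B (solve A B)

-- ===== LEMMAS AND PROOFS =====


def pvKeyList (A B : List Int) (i : Int) : List Int :=
  PySem.List.pyGetD A i 0 ::
    (if PySem.List.pyGetD A i 0 ≠ PySem.List.pyGetD B i 0 then [PySem.List.pyGetD B i 0] else [])

def pvFlat (A B : List Int) : List Int :=
  (PySem.List.pyRange 0 (A.length : Int)).flatMap (pvKeyList A B)

def pvTouch (A B : List Int) (v : Int) (i : Int) : Bool :=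
  PySem.List.pyGetD A i 0 == v || PySem.List.pyGetD B i 0 == v

theorem count_pvKeyList (A B : List Int) (v i : Int) :
    (pvKeyList A B i).count v = if pvTouch A B v i then 1 else 0 := by
  unfold pvKeyList pvTouch
  by_cases h : PySem.List.pyGetD A i 0 = PySem.List.pyGetD B i 0 <;>
    by_cases h1 : PySem.List.pyGetD A i 0 = v <;>
    by_cases h2 : PySem.List.pyGetD B i 0 = v <;>
    simp_all [List.count_cons, List.count_nil, List.count_singleton]
theorem count_pvFlat (A B : List Int) (v : Int) :
    (pvFlat A B).count v = (PySem.List.pyRange 0 (A.length : Int)).countP (pvTouch A B v) := by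
  unfold pvFlat
  rw [List.count_flatMap]
  induction PySem.List.pyRange 0 (A.length : Int) with
  | nil => simp
  | cons i l ih =>
      simp only [List.map_cons, List.sum_cons, List.countP_cons, ih, Function.comp_apply,
        count_pvKeyList]
      by_cases h : pvTouch A B v i <;> simp [h] <;> omega

def pvCntD (A B : List Int) : PySem.Dict Int Int :=
  (pvFlat A B).foldl (fun d k => d.modify k 0 (· + 1)) PySem.Dict.empty
def pvCntAD (A : List Int) : PySem.Dict Int Int :=
  A.foldl (fun d k => d.modify k 0 (· + 1)) PySem.Dict.empty

theorem pvCntD_getD (A B : List Int) (v : Int) :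
    (pvCntD A B).getD v 0 = ((pvFlat A B).count v : Int) := by
  unfold pvCntD
  rw [PySem.Dict.getD_foldl_modify_add_one, PySem.Dict.getD_empty]
  ring

theorem pvCntAD_getD (A : List Int) (v : Int) :
    (pvCntAD A).getD v 0 = (A.count v : Int) := by
  unfold pvCntAD
  rw [PySem.Dict.getD_foldl_modify_add_one, PySem.Dict.getD_empty]
  ring

theorem pvCntD_keys_mem (A B : List Int) (v : Int) :
    v ∈ (pvCntD A B).keys ↔ v ∈ pvFlat A B := by
  unfold pvCntD
  rw [PySem.Dict.keys_foldl_modify (f := fun _ _ => (· + 1))]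
  rw [PySem.Set.mem_update]
  simp [PySem.Dict.keys_empty]

theorem pvCntD_keys_nodup (A B : List Int) : (pvCntD A B).keys.Nodup := by
  unfold pvCntD
  exact PySem.Dict.nodup_keys_foldl_modify_key (ν := Int) (pvFlat A B) (fun k => k) 0
      (fun _ _ => (· + 1)) PySem.Dict.empty (by simp [PySem.Dict.keys_empty])

def pvFeas (A B : List Int) (v : Int) : Bool := (A.zip B).all (fun p => p.1 == v || p.2 == v)
def pvCost (A : List Int) (v : Int) : Int := (A.countP (fun a => a ≠ v) : Int)

theorem pvFeas_iff (A B : List Int) (hpre : A.length ≤ B.length) (v : Int) :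
    pvFeas A B v = true ↔
      ∀ i ∈ PySem.List.pyRange 0 (A.length : Int), pvTouch A B v i = true := by
  unfold pvFeas pvTouch
  rw [List.all_eq_true]
  constructor
  · intro h i hi
    obtain ⟨h0, h1⟩ := PySem.List.mem_pyRange_one.mp hi
    have hj : i.toNat < A.length := by omega
    have hjB : i.toNat < B.length := by omega
    have hjz : i.toNat < (A.zip B).length := by simp [List.length_zip]; omega
    have := h ((A.zip B)[i.toNat]) (List.getElem_mem hjz)
    rw [List.getElem_zip] at this
    rw [PySem.List.pyGetD_eq_getElem A 0 h0 (by omega),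
        PySem.List.pyGetD_eq_getElem B 0 h0 (by omega)]
    exact this
  · intro h p hp
    obtain ⟨j, hjz, rfl⟩ := List.mem_iff_getElem.mp hp
    have hj : j < A.length := by simp [List.length_zip] at hjz; omega
    have hi : (j : Int) ∈ PySem.List.pyRange 0 (A.length : Int) :=
      PySem.List.mem_pyRange_one.mpr (by omega)
    have := h (j : Int) hi
    rw [PySem.List.pyGetD_eq_getElem A 0 (by omega) (by omega),
        PySem.List.pyGetD_eq_getElem B 0 (by omega) (by omega)] at this
    rw [List.getElem_zip]
    simpa using this

theorem pvCost_eq (A : List Int) (v : Int) :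
    ((A.length : Int)) - (A.count v : Int) = pvCost A v := by
  unfold pvCost
  have h1 : A.count v = A.countP (fun a => a == v) := List.count_eq_countP
  have h2 : A.length = A.countP (fun a => a == v) + A.countP (fun a => decide (¬ (fun a => a == v) a = true)) :=
    List.length_eq_countP_add_countP _
  have h3 : A.countP (fun a => decide (¬ (fun a => a == v) a = true)) = A.countP (fun a => decide (a ≠ v)) := by
    apply List.countP_congr; intro a _; simp
  omega

theorem pvSum_eq (A : List Int) (v : Int) :
    (A.map (fun a => if a ≠ v then (1 : Int) else 0)).sum = pvCost A v := by
  unfold pvCost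
  rw [show (fun a => if a ≠ v then (1 : Int) else 0)
        = (fun a => if (fun a => decide (a ≠ v)) a = true then (1 : Int) else 0) by
      funext a; simp]
  rw [PySem.List.sum_map_ite_one_zero]

theorem pvCnt_fold (A B : List Int) :
    (PySem.List.pyRange 0 ((A.length : Int))).foldl
      (fun (c : PySem.Dict Int Int) i =>
        if PySem.List.pyGetD A i 0 ≠ PySem.List.pyGetD B i 0 then
          (c.modify (PySem.List.pyGetD A i 0) 0 (· + 1)).modify (PySem.List.pyGetD B i 0) 0 (· + 1)
        else c.modify (PySem.List.pyGetD A i 0) 0 (· + 1))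
      PySem.Dict.empty = pvCntD A B := by
  unfold pvCntD pvFlat
  rw [List.foldl_flatMap]
  apply PySem.List.foldl_congr_mem
  intro acc i _
  unfold pvKeyList
  by_cases h : PySem.List.pyGetD A i 0 = PySem.List.pyGetD B i 0 <;> simp [h]

theorem pvCntA_fold (A : List Int) :
    (PySem.List.pyRange 0 ((A.length : Int))).foldl
      (fun (d : PySem.Dict Int Int) i => d.modify (PySem.List.pyGetD A i 0) 0 (· + 1))
      PySem.Dict.empty = pvCntAD A := by
  unfold pvCntAD
  conv_rhs => rw [← PySem.List.map_pyGetD_pyRange_zero A 0, List.foldl_map]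
  simp [PySem.List.len]

theorem pvRange_len (n : Nat) : (PySem.List.pyRange 0 ((n : Int))).length = n := by
  simp [PySem.List.pyRange]
  omega

theorem solveA_eq (A B : List Int) (hpre : A.length ≤ B.length) :
    solve A B =
      (((pvCntD A B).keys.filter (pvFeas A B)).map (pvCost A)).foldl
        (fun ans y => if ans = -1 then y else min ans y) (-1) := by
  have hst :
      (PySem.List.pyRange 0 ((A.length : Int))).foldl
        (fun (s : PySem.Dict Int Int × PySem.Dict Int Int) i =>
          (if PySem.List.pyGetD A i 0 ≠ PySem.List.pyGetD B i 0 then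
              (s.1.modify (PySem.List.pyGetD A i 0) 0 (· + 1)).modify (PySem.List.pyGetD B i 0) 0
                (· + 1)
            else s.1.modify (PySem.List.pyGetD A i 0) 0 (· + 1),
           s.2.modify (PySem.List.pyGetD A i 0) 0 (· + 1)))
        (PySem.Dict.empty, PySem.Dict.empty) = (pvCntD A B, pvCntAD A) := by
    refine (PySem.List.foldl_prod_mk
        (fun (c : PySem.Dict Int Int) i =>
          if PySem.List.pyGetD A i 0 ≠ PySem.List.pyGetD B i 0 then
            (c.modify (PySem.List.pyGetD A i 0) 0 (· + 1)).modify (PySem.List.pyGetD B i 0) 0 (· + 1)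
          else c.modify (PySem.List.pyGetD A i 0) 0 (· + 1))
        (fun (d : PySem.Dict Int Int) i => d.modify (PySem.List.pyGetD A i 0) 0 (· + 1))
        _ _ _).trans ?_
    rw [pvCnt_fold A B, pvCntA_fold A]
  simp only [solve, hst]
  rw [PySem.Dict.items_eq_map_keys _ (pvCntD_keys_nodup A B) 0, List.foldl_map]
  have hcond : ∀ k, ((pvCntD A B).getD k 0 = ((A.length : Int))) ↔ pvFeas A B k = true := by
    intro k
    rw [pvCntD_getD, count_pvFlat, pvFeas_iff A B hpre k]
    calc ((((PySem.List.pyRange 0 ((A.length : Int))).countP (pvTouch A B k) : Nat)) : Int)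
          = ((A.length : Int))
        ↔ (PySem.List.pyRange 0 ((A.length : Int))).countP (pvTouch A B k) = A.length :=
          Nat.cast_inj
      _ ↔ (PySem.List.pyRange 0 ((A.length : Int))).countP (pvTouch A B k)
            = (PySem.List.pyRange 0 ((A.length : Int))).length := by rw [pvRange_len]
      _ ↔ ∀ i ∈ PySem.List.pyRange 0 ((A.length : Int)), pvTouch A B k i = true :=
          List.countP_eq_length
  have hcongr :
      ∀ (acc : Int), ∀ k ∈ (pvCntD A B).keys,
        (if (pvCntD A B).getD k 0 = ((A.length : Int)) then
            if acc = -1 then ((A.length : Int)) - (pvCntAD A).getD k 0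
            else min acc (((A.length : Int)) - (pvCntAD A).getD k 0)
          else acc)
        = (if pvFeas A B k = true then
            if acc = -1 then pvCost A k else min acc (pvCost A k)
          else acc) := by
    intro acc k _
    rw [if_congr (hcond k) rfl rfl, pvCntAD_getD, pvCost_eq]
  rw [PySem.List.foldl_congr_mem _ _ _ _ hcongr, ← List.foldl_filter,
    ← List.foldl_map (f := pvCost A) (g := fun ans y => if ans = -1 then y else min ans y)]

theorem solveB_eq (A B : List Int) (hA : ¬ A.length = 0) :
    solve_alt A B =
      (match PySem.List.min?
          (((PySem.Set.ofList [PySem.List.pyGetD A 0 0, PySem.List.pyGetD B 0 0] :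
              List Int).filter (pvFeas A B)).map (pvCost A)) (fun x => x) with
        | some m => m
        | none => -1) := by
  simp only [solve_alt, if_neg hA]
  have h1 : (fun v => (A.zip B).all (fun p => p.1 == v || p.2 == v)) = pvFeas A B := rfl
  rw [h1]
  rw [List.map_congr_left (fun v _ => pvSum_eq A v)]

def pvIsMin (F : List Int) (r : Int) : Prop := (F = [] ∧ r = -1) ∨ (r ∈ F ∧ ∀ y ∈ F, r ≤ y)

theorem pvIsMin_unique {F₁ F₂ : List Int} {r₁ r₂ : Int}
    (h₁ : pvIsMin F₁ r₁) (h₂ : pvIsMin F₂ r₂) (hmem : ∀ y, y ∈ F₁ ↔ y ∈ F₂) : r₁ = r₂ := by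
  rcases h₁ with ⟨he₁, hr₁⟩ | ⟨hm₁, hl₁⟩ <;> rcases h₂ with ⟨he₂, hr₂⟩ | ⟨hm₂, hl₂⟩
  · omega
  · exact absurd ((hmem r₂).mpr hm₂) (by simp [he₁])
  · exact absurd ((hmem r₁).mp hm₁) (by simp [he₂])
  · exact le_antisymm (hl₁ r₂ ((hmem r₂).mpr hm₂)) (hl₂ r₁ ((hmem r₁).mp hm₁))

theorem pvIsMin_min? (F : List Int) :
    pvIsMin F (match PySem.List.min? F (fun x => x) with | some m => m | none => -1) := by
  rcases h : PySem.List.min? F (fun x => x) with _ | m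
  · exact Or.inl ⟨(PySem.List.min?_eq_none_iff F _).mp h, rfl⟩
  · exact Or.inr ⟨PySem.List.min?_mem h, fun y hy => PySem.List.min?_isMin h y hy⟩

theorem foldl_gmin_ge (xs : List Int) : ∀ a : Int, 0 ≤ a → (∀ y ∈ xs, (0:Int) ≤ y) →
    (xs.foldl (fun ans y => if ans = -1 then y else min ans y) a = a ∨
       xs.foldl (fun ans y => if ans = -1 then y else min ans y) a ∈ xs) ∧
    xs.foldl (fun ans y => if ans = -1 then y else min ans y) a ≤ a ∧
    ∀ y ∈ xs, xs.foldl (fun ans y => if ans = -1 then y else min ans y) a ≤ y := by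
  induction xs with
  | nil => intro a _ _; simp
  | cons x xs ih =>
    intro a ha hnn
    have hx : (0:Int) ≤ x := hnn x (by simp)
    have step : (if a = -1 then x else min a x) = min a x := by
      have : a ≠ -1 := by omega
      simp [this]
    simp only [List.foldl_cons, step]
    obtain ⟨hmem, hle, hall⟩ := ih (min a x) (le_min ha hx) (fun y hy => hnn y (by simp [hy]))
    refine ⟨?_, ?_, ?_⟩
    · rcases hmem with h | h
      · rcases le_total a x with hax | hax
        · left; rw [h, min_eq_left hax]
        · right; rw [List.mem_cons]; exact Or.inl (by rw [h, min_eq_right hax])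
      · right; simp [h]
    · exact hle.trans (min_le_left _ _)
    · intro y hy
      rcases List.mem_cons.mp hy with rfl | hy
      · exact hle.trans (min_le_right _ _)
      · exact hall y hy

theorem pvIsMin_foldl (F : List Int) (hnn : ∀ y ∈ F, (0:Int) ≤ y) :
    pvIsMin F (F.foldl (fun ans y => if ans = -1 then y else min ans y) (-1)) := by
  rcases F with _ | ⟨x, xs⟩
  · exact Or.inl ⟨rfl, rfl⟩
  · have hx : (0:Int) ≤ x := hnn x (by simp)
    simp only [List.foldl_cons]
    obtain ⟨hmem, hle, hall⟩ := foldl_gmin_ge xs x hx (fun y hy => hnn y (by simp [hy]))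
    refine Or.inr ⟨?_, ?_⟩
    · rcases hmem with h | h
      · simp [h]
      · simp [h]
    · intro y hy
      rcases List.mem_cons.mp hy with rfl | hy
      · exact hle
      · exact hall y hy

theorem solve_eq_alt (A B : List Int) (hpre : A.length ≤ B.length) :
    solve A B = solve_alt A B := by
  rcases Nat.eq_zero_or_pos A.length with h0 | hpos
  · have hAnil : A = [] := List.length_eq_zero_iff.mp h0
    subst hAnil
    rfl
  · rw [solveA_eq A B hpre, solveB_eq A B (by omega)]
    have hfeas_mem : ∀ v : Int, pvFeas A B v = true →
        (v = PySem.List.pyGetD A 0 0 ∨ v = PySem.List.pyGetD B 0 0) := by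
      intro v hf
      have h0R : (0 : Int) ∈ PySem.List.pyRange 0 ((A.length : Int)) :=
        PySem.List.mem_pyRange_one.mpr (by omega)
      have := (pvFeas_iff A B hpre v).mp hf 0 h0R
      unfold pvTouch at this
      rcases Bool.or_eq_true_iff.mp this with h | h
      · exact Or.inl (beq_iff_eq.mp h).symm
      · exact Or.inr (beq_iff_eq.mp h).symm
    have hkeys : ∀ v : Int, pvFeas A B v = true → v ∈ (pvCntD A B).keys := by
      intro v hf
      rw [pvCntD_keys_mem]
      unfold pvFlat
      refine List.mem_flatMap.mpr ⟨0, PySem.List.mem_pyRange_one.mpr (by omega), ?_⟩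
      rcases hfeas_mem v hf with rfl | rfl
      · exact List.mem_cons_self
      · by_cases hab : PySem.List.pyGetD A 0 0 = PySem.List.pyGetD B 0 0
        · rw [← hab]; exact List.mem_cons_self
        · simp [pvKeyList, hab]
    refine pvIsMin_unique (pvIsMin_foldl _ ?_) (pvIsMin_min? _) ?_
    · intro y hy
      obtain ⟨v, _, rfl⟩ := List.mem_map.mp hy
      simp [pvCost]
    · intro y
      simp only [List.mem_map, List.mem_filter]
      constructor
      · rintro ⟨v, ⟨hk, hf⟩, rfl⟩
        refine ⟨v, ⟨?_, hf⟩, rfl⟩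
        rw [PySem.Set.mem_ofList]
        rcases hfeas_mem v hf with rfl | rfl
        · exact List.mem_cons_self
        · exact List.mem_cons.mpr (Or.inr List.mem_cons_self)
      · rintro ⟨v, ⟨_, hf⟩, rfl⟩
        exact ⟨v, ⟨hkeys v hf, hf⟩, rfl⟩

-- ===== VERDICT (by name: the statement is the Claim_ definition above) =====
theorem solve_spec : Claim_equal_solve := by
  intro A B _ hpre
  unfold Spec_solve
  exact solve_eq_alt A B hpre
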